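-- pv_equiv track=rewrite | github.com/CIRISAI/CIRISAgent | ciris_engine/logic/adapters/api/routes/setup/location.py | _update_env_lines
-- ===== SOURCE A (Python) =====
-- def _update_env_lines(lines: list[str], updates: dict[str, str]) -> list[str]:
--     """Update or append env var lines."""
--     for key, value in updates.items():
--         found = False
--         for i, line in enumerate(lines):
--             if line.startswith(f"{key}="):
--                 lines[i] = f'{key}="{value}"' if value else f"{key}="
--                 found = True
--                 break
--         if not found and value:
--             lines.append(f'{key}="{value}"')
--     return lines
-- ===== SOURCE B (Python) =====
-- def _update_env_lines(lines: list[str], updates: dict[str, str]) -> list[str]: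
--     """Update or append env var lines: one pass over lines, then append the rest."""
--     handled = set()
--     for i, line in enumerate(lines):
--         idx = line.find("=")
--         if idx == -1:
--             continue
--         key = line[:idx]
--         if key in updates and key not in handled:
--             value = updates[key]
--             lines[i] = f'{key}="{value}"' if value else f"{key}="
--             handled.add(key)
--     for key, value in updates.items():
--         if key not in handled and value:
--             lines.append(f'{key}="{value}"')
--     return lines
-- ===== Notes on version B (the rewrite author's own statement) =====
-- stated objective: faster
-- what changed: Inverts the loop nesting: instead of scanning the whole lines list once per update key, B makes a single pass over lines, parsing each line's key (text before its first '=') and looking it up in the updates dict with a handled-set, then appends the remaining truthy updates in insertion order.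
-- outside the precondition, e.g. on _update_env_lines(['A=B=1'], {'A=B': '2'}): A returns ['A=B="2"'], B returns ['A=B=1', 'A=B="2"']
import Mathlib
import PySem

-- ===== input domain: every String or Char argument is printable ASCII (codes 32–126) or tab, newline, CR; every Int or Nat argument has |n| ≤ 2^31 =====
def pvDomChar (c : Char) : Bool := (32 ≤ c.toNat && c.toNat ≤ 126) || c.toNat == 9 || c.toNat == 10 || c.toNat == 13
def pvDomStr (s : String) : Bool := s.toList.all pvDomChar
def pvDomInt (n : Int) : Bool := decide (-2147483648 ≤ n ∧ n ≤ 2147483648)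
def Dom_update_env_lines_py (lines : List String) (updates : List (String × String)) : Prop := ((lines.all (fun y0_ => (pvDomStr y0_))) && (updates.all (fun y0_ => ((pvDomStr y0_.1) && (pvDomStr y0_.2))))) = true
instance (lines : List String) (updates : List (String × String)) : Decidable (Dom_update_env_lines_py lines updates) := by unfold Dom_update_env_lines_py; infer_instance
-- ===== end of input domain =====

-- B replaces A's per-key scan of `lines` by a single pass over `lines` (parse each
-- line's key, dict lookup, handled-set) followed by the appends; equal return value
-- on Pre_ (both Pythons mutate `lines` in place the same way; the theorems are about
-- the returned list).

-- ===== PORT A =====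
-- inner 'for i, line in enumerate(lines): … break': first line starting with key+'=' is
-- replaced; 'some' = found, 'none' = not found
def aFindReplace (key value : String) : List String → Option (List String)
  | [] => none
  | l :: rest =>
    if PySem.Str.startswith l (key ++ "=") then
      some ((if value ≠ "" then key ++ "=\"" ++ value ++ "\"" else key ++ "=") :: rest)
    else (aFindReplace key value rest).map (l :: ·)

def update_env_lines_py (lines : List String) (updates : List (String × String)) : List String :=
  updates.foldl (fun ls kv =>
    match aFindReplace kv.1 kv.2 ls with
    | some ls' => ls'
    | none => if kv.2 ≠ "" then ls ++ [kv.1 ++ "=\"" ++ kv.2 ++ "\""] else ls) lines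

-- ===== PORT B =====
-- single pass over lines: parse key = text before the first '=', look it up in the
-- updates dict (assoc list, first match), skip keys already handled; returns the
-- rewritten lines and the handled set
def bPass (updates : List (String × String)) : List String → PySem.Set String → List String × PySem.Set String
  | [], handled => ([], handled)
  | l :: rest, handled =>
    let idx := PySem.Str.find l "="
    if idx = -1 then
      let r := bPass updates rest handled
      (l :: r.1, r.2)
    else
      let key := PySem.Str.slice l none (some idx)
      match updates.lookup key with
      | some value =>
        if PySem.Set.contains handled key then
          let r := bPass updates rest handled
          (l :: r.1, r.2)
        else
          let r := bPass updates rest (PySem.Set.add handled key)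
          ((if value ≠ "" then key ++ "=\"" ++ value ++ "\"" else key ++ "=") :: r.1, r.2)
      | none =>
        let r := bPass updates rest handled
        (l :: r.1, r.2)

def update_env_lines_py_alt (lines : List String) (updates : List (String × String)) : List String :=
  let p := bPass updates lines PySem.Set.empty
  updates.foldl (fun ls kv =>
    if ¬ PySem.Set.contains p.2 kv.1 ∧ kv.2 ≠ "" then ls ++ [kv.1 ++ "=\"" ++ kv.2 ++ "\""] else ls) p.1

-- ===== PRECONDITION & SPEC =====
-- Pre_ requires distinct keys (the dict invariant every Python call satisfies) and
-- excludes inputs where a malformed '='-containing key would actually prefix-match an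
-- existing line or a line the update itself writes — the corner where A's startswith
-- test and B's parse-before-the-first-'=' legitimately disagree.
def Pre_update_env_lines_py (lines : List String) (updates : List (String × String)) : Prop :=
  (updates.map Prod.fst).Nodup ∧
  (∀ p ∈ updates, '=' ∈ p.1.toList → ∀ l ∈ lines, ¬ PySem.Str.startswith l (p.1 ++ "=") = true) ∧
  (∀ p ∈ updates, ∀ q ∈ updates, p.1 ≠ q.1 → ('=' ∈ p.1.toList ∨ '=' ∈ q.1.toList) →
    ¬ PySem.Str.startswith (q.1 ++ "=\"" ++ q.2 ++ "\"") (p.1 ++ "=") = true ∧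
    ¬ PySem.Str.startswith (q.1 ++ "=") (p.1 ++ "=") = true)
instance (lines : List String) (updates : List (String × String)) : Decidable (Pre_update_env_lines_py lines updates) := by unfold Pre_update_env_lines_py; infer_instance

def pvWitness_update_env_lines_py : List String × (List (String × String)) :=
  (["PORT=80", "HOST"], [("HOST", "x"), ("PORT", ""), ("DEBUG", "")])

def Spec_update_env_lines_py (lines : List String) (updates : List (String × String)) (out : List String) : Prop := out = update_env_lines_py_alt lines updates
instance (lines : List String) (updates : List (String × String)) (out : List String) : Decidable (Spec_update_env_lines_py lines updates out) := by unfold Spec_update_env_lines_py; infer_instance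

-- ===== CLAIM (what is proved, stated in full; the proofs are below) =====
def Claim_equal_update_env_lines_py : Prop := ∀ (lines : List String) (updates : List (String × String)), Dom_update_env_lines_py lines updates → Pre_update_env_lines_py lines updates → Spec_update_env_lines_py lines updates (update_env_lines_py lines updates)

-- ===== LEMMAS AND PROOFS =====

-- the replacement/append string both Pythons build
def fmt (k v : String) : String := if v ≠ "" then k ++ "=\"" ++ v ++ "\"" else k ++ "="

-- the key a line carries: the text before its first '=', if any
def lineKey (l : String) : Option String :=
  if '=' ∈ l.toList then some (String.ofList (l.toList.takeWhile (· ≠ '='))) else none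

-- the append phase of B
def appPhase (updates : List (String × String)) (h : PySem.Set String) (ls : List String) : List String :=
  updates.foldl (fun ls kv =>
    if ¬ PySem.Set.contains h kv.1 ∧ kv.2 ≠ "" then ls ++ [kv.1 ++ "=\"" ++ kv.2 ++ "\""] else ls) ls

lemma alt_eq (lines : List String) (updates : List (String × String)) :
    update_env_lines_py_alt lines updates =
      appPhase updates (bPass updates lines PySem.Set.empty).2 (bPass updates lines PySem.Set.empty).1 := rfl

lemma split_at_first_eq (cs : List Char) (h : '=' ∈ cs) :
    cs = cs.takeWhile (· ≠ '=') ++ '=' :: (cs.dropWhile (· ≠ '=')).tail := by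
  induction cs with
  | nil => cases h
  | cons c cs ih =>
    by_cases hc : c = '='
    · subst hc; simp
    · have hmem : '=' ∈ cs := by
        rcases List.mem_cons.mp h with h' | h'
        · exact absurd h'.symm hc
        · exact h'
      simpa [List.takeWhile_cons, List.dropWhile_cons, hc] using ih hmem

lemma takeWhile_append_eq (xs ys : List Char) (hx : '=' ∉ xs) :
    (xs ++ '=' :: ys).takeWhile (· ≠ '=') = xs := by
  induction xs with
  | nil => rw [List.nil_append, List.takeWhile_cons, if_neg (by simp)]
  | cons x xs ih =>
    have hx1 : x ≠ '=' := fun h => hx (by simp [h])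
    have hx2 : '=' ∉ xs := fun h => hx (by simp [h])
    rw [List.cons_append, List.takeWhile_cons, if_pos (by simp [hx1]), ih hx2]

lemma lineKey_eq_some_iff (l k : String) (hk : '=' ∉ k.toList) :
    lineKey l = some k ↔ ∃ rest, l.toList = k.toList ++ '=' :: rest := by
  unfold lineKey
  split
  · rename_i hm
    constructor
    · intro hsome
      have hks : k = String.ofList (l.toList.takeWhile (· ≠ '=')) := (Option.some.inj hsome).symm
      refine ⟨(l.toList.dropWhile (· ≠ '=')).tail, ?_⟩
      rw [hks, String.toList_ofList]
      exact split_at_first_eq l.toList hm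
    · rintro ⟨rest, hrest⟩
      have : l.toList.takeWhile (· ≠ '=') = k.toList := by
        rw [hrest]; exact takeWhile_append_eq _ _ hk
      rw [this]
      exact congrArg some (String.toList_inj.mp String.toList_ofList)
  · rename_i hm
    simp only [false_iff, reduceCtorEq]
    rintro ⟨rest, hrest⟩
    exact hm (by rw [hrest]; simp)

lemma lineKey_fmt (k v : String) (hk : '=' ∉ k.toList) : lineKey (fmt k v) = some k := by
  rw [lineKey_eq_some_iff _ _ hk]
  unfold fmt
  split
  · exact ⟨'"' :: v.toList ++ ['"'], by simp [String.toList_append]⟩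
  · exact ⟨[], by simp [String.toList_append]⟩

lemma A_match (l k : String) (hk : '=' ∉ k.toList) :
    PySem.Str.startswith l (k ++ "=") = true ↔ lineKey l = some k := by
  rw [PySem.Str.startswith_eq, PySem.Chars.startswith_iff, lineKey_eq_some_iff _ _ hk]
  constructor
  · rintro ⟨t, ht⟩
    exact ⟨t, by simpa [String.toList_append] using ht.symm⟩
  · rintro ⟨rest, hrest⟩
    exact ⟨rest, by simp [String.toList_append, hrest]⟩

lemma aFind_cons (k v l : String) (rest : List String) (hk : '=' ∉ k.toList) :
    aFindReplace k v (l :: rest) =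
      if lineKey l = some k then some (fmt k v :: rest)
      else (aFindReplace k v rest).map (l :: ·) := by
  show (if PySem.Str.startswith l (k ++ "=") = true then _ else _) = _
  by_cases hm : lineKey l = some k
  · rw [if_pos ((A_match l k hk).mpr hm), if_pos hm]; rfl
  · rw [if_neg (fun hs => hm ((A_match l k hk).mp hs)), if_neg hm]

lemma B_find_neg (l : String) : PySem.Str.find l "=" = -1 ↔ lineKey l = none := by
  have : ("=" : String).toList = ['='] := rfl
  rw [PySem.Str.find_eq, this, PySem.Chars.find_eq_neg_one_iff,
      List.singleton_infix_iff]
  unfold lineKey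
  split <;> rename_i hm <;> simp [hm]

lemma B_key (l : String) (h : ¬ PySem.Str.find l "=" = -1) :
    lineKey l = some (PySem.Str.slice l none (some (PySem.Str.find l "="))) := by
  have heq : ("=" : String).toList = ['='] := rfl
  set idx := PySem.Str.find l "=" with hidx
  have hidx' : idx = PySem.Chars.find l.toList ['='] := by rw [hidx, PySem.Str.find_eq, heq]
  have hge : 0 ≤ idx := by
    have := PySem.Chars.neg_one_le_find l.toList ['=']
    rw [← hidx'] at this; omega
  have hspec := PySem.Chars.find_spec (s := l.toList) (sub := ['=']) (by rw [← hidx']; exact hge)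
  rw [← hidx'] at hspec
  set n := idx.toNat with hn
  -- the slice is take n
  have hslice : (PySem.Str.slice l none (some idx)).toList = l.toList.take n := by
    rw [PySem.Str.toList_slice, PySem.Chars.slice_eq_listSlice, PySem.List.slice_to _ hge]
  -- l.toList[n] = '=' and decomposition
  obtain ⟨t, ht⟩ := hspec.1
  have hdropeq : List.drop n l.toList = '=' :: t := ht.symm
  have hdecomp : l.toList = l.toList.take n ++ '=' :: t := by
    conv_lhs => rw [← List.take_append_drop n l.toList]
    rw [hdropeq]
  -- no '=' in the take
  have hnotin : '=' ∉ l.toList.take n := by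
    intro hmem
    obtain ⟨i, hi, hget⟩ := List.mem_iff_getElem.mp hmem
    have hilen : i < l.toList.length := lt_of_lt_of_le hi (by simp [List.length_take])
    have hin : i < n := lt_of_lt_of_le hi (by simp [List.length_take])
    apply hspec.2 i hin
    refine ⟨List.drop (i + 1) l.toList, ?_⟩
    rw [List.drop_eq_getElem_cons hilen]
    have : l.toList[i] = '=' := by rw [← List.getElem_take (h := hi)] at *; exact hget
    simp [this]
  rw [lineKey_eq_some_iff _ _ (by rw [hslice]; exact hnotin)]
  exact ⟨t, by rw [hslice]; exact hdecomp⟩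

lemma bPass_cons (updates : List (String × String)) (l : String) (rest : List String)
    (handled : PySem.Set String) :
    bPass updates (l :: rest) handled =
      match lineKey l with
      | none => ((l :: (bPass updates rest handled).1), (bPass updates rest handled).2)
      | some key =>
        match updates.lookup key with
        | none => ((l :: (bPass updates rest handled).1), (bPass updates rest handled).2)
        | some value =>
          if key ∈ handled then ((l :: (bPass updates rest handled).1), (bPass updates rest handled).2)
          else ((fmt key value :: (bPass updates rest (PySem.Set.add handled key)).1),
                (bPass updates rest (PySem.Set.add handled key)).2) := by
  by_cases hf : PySem.Str.find l "=" = -1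
  · rw [(B_find_neg l).mp hf]
    simp only [bPass, if_pos hf]
  · rw [B_key l hf]
    simp only [bPass, if_neg hf]
    cases hlu : updates.lookup (PySem.Str.slice l none (some (PySem.Str.find l "="))) with
    | none => rfl
    | some value =>
      simp only [PySem.Set.contains_iff, fmt]

lemma lookup_eq_none_of_not_mem (k : String) (us : List (String × String))
    (h : k ∉ us.map Prod.fst) : us.lookup k = none := by
  induction us with
  | nil => rfl
  | cons p us ih =>
    simp only [List.map_cons, List.mem_cons, not_or] at h
    obtain ⟨p1, p2⟩ := p
    rw [List.lookup_cons]
    have : (k == p1) = false := by simpa [beq_eq_false_iff_ne] using h.1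
    simp [this, ih h.2]

-- skip lemma: with k already handled on the left and absent from us on the right,
-- the extra dict entry (k, v) is never used
lemma bPass_skip (k v : String) (us : List (String × String)) (hknotin : k ∉ us.map Prod.fst) :
    ∀ (ls : List String) (h1 h2 : PySem.Set String), (∀ x, x ∈ h2 ↔ x = k ∨ x ∈ h1) →
      (bPass ((k, v) :: us) ls h2).1 = (bPass us ls h1).1 ∧
      (∀ x, x ∈ (bPass ((k, v) :: us) ls h2).2 ↔ x = k ∨ x ∈ (bPass us ls h1).2) := by
  intro ls
  induction ls with
  | nil => intro h1 h2 hh; exact ⟨rfl, hh⟩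
  | cons l ls ih =>
    intro h1 h2 hh
    rw [bPass_cons, bPass_cons]
    cases hlk : lineKey l with
    | none =>
      obtain ⟨e1, e2⟩ := ih h1 h2 hh
      exact ⟨by simpa using e1, e2⟩
    | some key =>
      simp only []
      rw [List.lookup_cons]
      by_cases hkey : key = k
      · subst hkey
        rw [show (key == key) = true from beq_self_eq_true key]
        simp only []
        have hk2 : key ∈ h2 := (hh key).mpr (Or.inl rfl)
        rw [if_pos hk2, lookup_eq_none_of_not_mem key us hknotin]
        obtain ⟨e1, e2⟩ := ih h1 h2 hh
        exact ⟨by simpa using e1, e2⟩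
      · rw [show (key == k) = false from beq_eq_false_iff_ne.mpr hkey]
        simp only []
        cases hlu : us.lookup key with
        | none =>
          obtain ⟨e1, e2⟩ := ih h1 h2 hh
          exact ⟨by simpa using e1, e2⟩
        | some value =>
          simp only []
          have hmemeq : key ∈ h2 ↔ key ∈ h1 := by
            have := hh key
            constructor
            · intro hm; rcases this.mp hm with h' | h'
              · exact absurd h' hkey
              · exact h'
            · intro hm; exact this.mpr (Or.inr hm)
          by_cases hm1 : key ∈ h1
          · rw [if_pos (hmemeq.mpr hm1), if_pos hm1]
            obtain ⟨e1, e2⟩ := ih h1 h2 hh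
            exact ⟨by simpa using e1, e2⟩
          · rw [if_neg (fun hm => hm1 (hmemeq.mp hm)), if_neg hm1]
            have hh' : ∀ x, x ∈ PySem.Set.add h2 key ↔ x = k ∨ x ∈ PySem.Set.add h1 key := by
              intro x
              rw [PySem.Set.mem_add, PySem.Set.mem_add]
              constructor
              · rintro (hx | hx)
                · rcases (hh x).mp hx with h' | h'
                  · exact Or.inl h'
                  · exact Or.inr (Or.inl h')
                · exact Or.inr (Or.inr hx)
              · rintro (hx | hx)
                · exact Or.inl ((hh x).mpr (Or.inl hx))
                · rcases hx with hx | hx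
                  · exact Or.inl ((hh x).mpr (Or.inr hx))
                  · exact Or.inr hx
            obtain ⟨e1, e2⟩ := ih (PySem.Set.add h1 key) (PySem.Set.add h2 key) hh'
            exact ⟨by simpa using e1, e2⟩

-- central lemma: processing update (k, v) first (A's way) commutes with B's single pass
lemma bPass_commute (k v : String) (us : List (String × String))
    (hk : '=' ∉ k.toList) (hknotin : k ∉ us.map Prod.fst) :
    ∀ (ls : List String) (h : PySem.Set String), k ∉ h →
      match aFindReplace k v ls with
      | some ls' =>
          (bPass ((k, v) :: us) ls h).1 = (bPass us ls' h).1 ∧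
          (∀ x, x ∈ (bPass ((k, v) :: us) ls h).2 ↔ x = k ∨ x ∈ (bPass us ls' h).2)
      | none =>
          (bPass ((k, v) :: us) ls h).1 = (bPass us ls h).1 ∧
          (∀ x, x ∈ (bPass ((k, v) :: us) ls h).2 ↔ x ∈ (bPass us ls h).2) ∧
          k ∉ (bPass ((k, v) :: us) ls h).2 := by
  intro ls
  induction ls with
  | nil =>
    intro h hkh
    exact ⟨rfl, fun _ => Iff.rfl, hkh⟩
  | cons l ls ih =>
    intro h hkh
    rw [aFind_cons k v l ls hk]
    by_cases hlk : lineKey l = some k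
    · rw [if_pos hlk]
      simp only []
      rw [bPass_cons, bPass_cons, hlk, lineKey_fmt k v hk]
      simp only []
      rw [List.lookup_cons, show (k == k) = true from beq_self_eq_true k]
      simp only []
      rw [if_neg hkh, lookup_eq_none_of_not_mem k us hknotin]
      have hh : ∀ x, x ∈ PySem.Set.add h k ↔ x = k ∨ x ∈ h := by
        intro x; rw [PySem.Set.mem_add]; exact Or.comm
      obtain ⟨e1, e2⟩ := bPass_skip k v us hknotin ls h (PySem.Set.add h k) hh
      exact ⟨by simpa using e1, e2⟩
    · rw [if_neg hlk]
      cases hlk2 : lineKey l with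
      | none =>
        cases haf : aFindReplace k v ls with
        | some ls' =>
          simp only [Option.map_some]
          rw [bPass_cons, bPass_cons, hlk2]
          have := ih h hkh; rw [haf] at this
          obtain ⟨e1, e2⟩ := this
          exact ⟨by simpa using e1, e2⟩
        | none =>
          simp only [Option.map_none]
          rw [bPass_cons, bPass_cons, hlk2]
          have := ih h hkh; rw [haf] at this
          obtain ⟨e1, e2, e3⟩ := this
          exact ⟨by simpa using e1, e2, e3⟩
      | some key =>
        have hkeyne : key ≠ k := fun h' => hlk (by rw [hlk2, h'])
        have hlook : List.lookup key ((k, v) :: us) = List.lookup key us := by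
          rw [List.lookup_cons, show (key == k) = false from beq_eq_false_iff_ne.mpr hkeyne]
        cases haf : aFindReplace k v ls with
        | some ls' =>
          simp only [Option.map_some]
          rw [bPass_cons, bPass_cons, hlk2]
          simp only []
          rw [hlook]
          cases hlu : List.lookup key us with
          | none =>
            have := ih h hkh; rw [haf] at this
            obtain ⟨e1, e2⟩ := this
            exact ⟨by simpa using e1, e2⟩
          | some value =>
            simp only []
            by_cases hm : key ∈ h
            · rw [if_pos hm, if_pos hm]
              have := ih h hkh; rw [haf] at this
              obtain ⟨e1, e2⟩ := this
              exact ⟨by simpa using e1, e2⟩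
            · rw [if_neg hm, if_neg hm]
              have hkh' : k ∉ PySem.Set.add h key := by
                rw [PySem.Set.mem_add]
                rintro (h' | h')
                · exact hkh h'
                · exact hkeyne h'.symm
              have := ih (PySem.Set.add h key) hkh'; rw [haf] at this
              obtain ⟨e1, e2⟩ := this
              exact ⟨by simpa using e1, e2⟩
        | none =>
          simp only [Option.map_none]
          rw [bPass_cons, bPass_cons, hlk2]
          simp only []
          rw [hlook]
          cases hlu : List.lookup key us with
          | none =>
            have := ih h hkh; rw [haf] at this
            obtain ⟨e1, e2, e3⟩ := this
            exact ⟨by simpa using e1, e2, e3⟩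
          | some value =>
            simp only []
            by_cases hm : key ∈ h
            · rw [if_pos hm, if_pos hm]
              have := ih h hkh; rw [haf] at this
              obtain ⟨e1, e2, e3⟩ := this
              exact ⟨by simpa using e1, e2, e3⟩
            · rw [if_neg hm, if_neg hm]
              have hkh' : k ∉ PySem.Set.add h key := by
                rw [PySem.Set.mem_add]
                rintro (h' | h')
                · exact hkh h'
                · exact hkeyne h'.symm
              have := ih (PySem.Set.add h key) hkh'; rw [haf] at this
              obtain ⟨e1, e2, e3⟩ := this
              exact ⟨by simpa using e1, e2, e3⟩

lemma bPass_append (us : List (String × String)) (xs ys : List String) (h : PySem.Set String) :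
    bPass us (xs ++ ys) h =
      ((bPass us xs h).1 ++ (bPass us ys (bPass us xs h).2).1,
       (bPass us ys (bPass us xs h).2).2) := by
  induction xs generalizing h with
  | nil => simp [bPass]
  | cons l xs ih =>
    rw [List.cons_append, bPass_cons, bPass_cons]
    cases hlk : lineKey l with
    | none => simp [ih]
    | some key =>
      cases hlu : us.lookup key with
      | none => simp [hlu, ih]
      | some value =>
        by_cases hm : key ∈ h
        · simp [hlu, hm, ih]
        · simp [hlu, hm, ih]

lemma bPass_nil_dict (ls : List String) (h : PySem.Set String) : bPass [] ls h = (ls, h) := by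
  induction ls with
  | nil => rfl
  | cons l ls ih =>
    rw [bPass_cons]
    cases hlk : lineKey l with
    | none => simp [ih]
    | some key => simp [List.lookup_nil, ih]

lemma appPhase_congr (us : List (String × String)) (h1 h2 : PySem.Set String) :
    (∀ kv ∈ us, (kv.1 ∈ h1 ↔ kv.1 ∈ h2)) →
    ∀ ls, appPhase us h1 ls = appPhase us h2 ls := by
  induction us with
  | nil => intro _ ls; rfl
  | cons kv us ih =>
    intro hc ls
    have hcontains : PySem.Set.contains h1 kv.1 = PySem.Set.contains h2 kv.1 := by
      have h' := hc kv (List.mem_cons_self)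
      cases hb : PySem.Set.contains h2 kv.1
      · have : kv.1 ∉ h2 := fun hm => by
          rw [(PySem.Set.contains_iff _ _).mpr hm] at hb; cases hb
        have : kv.1 ∉ h1 := fun hm => this (h'.mp hm)
        cases hb1 : PySem.Set.contains h1 kv.1
        · rfl
        · exact absurd ((PySem.Set.contains_iff _ _).mp hb1) this
      · exact (PySem.Set.contains_iff _ _).mpr (h'.mpr ((PySem.Set.contains_iff _ _).mp hb))
    simp only [appPhase, List.foldl_cons]
    rw [hcontains]
    exact ih (fun p hp => hc p (List.mem_cons_of_mem _ hp)) _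

lemma appPhase_cons (us : List (String × String)) (k v : String) (h : PySem.Set String)
    (ls : List String) :
    appPhase ((k, v) :: us) h ls =
      appPhase us h (if ¬ PySem.Set.contains h k = true ∧ v ≠ "" then ls ++ [k ++ "=\"" ++ v ++ "\""] else ls) := by
  simp only [appPhase, List.foldl_cons]

lemma lineKey_no_eq (l key : String) (h : lineKey l = some key) : '=' ∉ key.toList := by
  unfold lineKey at h
  split at h
  · cases Option.some.inj h
    intro hm
    rw [String.toList_ofList] at hm
    have := List.mem_takeWhile_imp hm
    simp at this
  · cases h

lemma aFind_none (k v : String) (ls : List String)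
    (h : ∀ l ∈ ls, ¬ PySem.Str.startswith l (k ++ "=") = true) :
    aFindReplace k v ls = none := by
  induction ls with
  | nil => rfl
  | cons l ls ih =>
    show (if PySem.Str.startswith l (k ++ "=") = true then _ else _) = _
    rw [if_neg (h l List.mem_cons_self), ih (fun l' hl' => h l' (List.mem_cons_of_mem _ hl'))]
    rfl

lemma bPass_irrelevant (k v : String) (us : List (String × String)) (hk : '=' ∈ k.toList) :
    ∀ (ls : List String) (h : PySem.Set String), bPass ((k, v) :: us) ls h = bPass us ls h := by
  intro ls
  induction ls with
  | nil => intro h; rfl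
  | cons l ls ih =>
    intro h
    rw [bPass_cons, bPass_cons]
    cases hlk : lineKey l with
    | none => simp [ih]
    | some key =>
      have hne : key ≠ k := fun he => lineKey_no_eq l key hlk (he ▸ hk)
      simp only []
      rw [List.lookup_cons, show (key == k) = false from beq_eq_false_iff_ne.mpr hne]
      simp only []
      cases hlu : us.lookup key with
      | none => simp [ih]
      | some value =>
        by_cases hm : key ∈ h
        · simp [hm, ih]
        · simp [hm, ih]

lemma bPass_handled (us : List (String × String)) (ls : List String) :
    ∀ (h : PySem.Set String) (x : String), x ∈ (bPass us ls h).2 → x ∈ h ∨ '=' ∉ x.toList := by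
  induction ls with
  | nil => intro h x hx; exact Or.inl hx
  | cons l ls ih =>
    intro h x hx
    rw [bPass_cons] at hx
    cases hlk : lineKey l with
    | none => rw [hlk] at hx; exact ih h x hx
    | some key =>
      rw [hlk] at hx
      simp only [] at hx
      cases hlu : us.lookup key with
      | none => rw [hlu] at hx; exact ih h x hx
      | some value =>
        rw [hlu] at hx
        simp only [] at hx
        by_cases hm : key ∈ h
        · rw [if_pos hm] at hx; exact ih h x hx
        · rw [if_neg hm] at hx
          rcases ih (PySem.Set.add h key) x hx with hx' | hx'
          · rcases (PySem.Set.mem_add h key x).mp hx' with hx'' | hx''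
            · exact Or.inl hx''
            · exact Or.inr (hx'' ▸ lineKey_no_eq l key hlk)
          · exact Or.inr hx'

lemma mem_aFind (k v : String) : ∀ (ls ls' : List String),
    aFindReplace k v ls = some ls' → ∀ l ∈ ls', l ∈ ls ∨ l = fmt k v := by
  intro ls
  induction ls with
  | nil => intro ls' h; cases h
  | cons l0 ls ih =>
    intro ls' h l hl
    rw [show aFindReplace k v (l0 :: ls) =
        (if PySem.Str.startswith l0 (k ++ "=") = true then
          some ((if v ≠ "" then k ++ "=\"" ++ v ++ "\"" else k ++ "=") :: ls)
        else (aFindReplace k v ls).map (l0 :: ·)) from rfl] at h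
    by_cases hs : PySem.Str.startswith l0 (k ++ "=") = true
    · rw [if_pos hs] at h
      cases Option.some.inj h
      rcases List.mem_cons.mp hl with hl' | hl'
      · exact Or.inr (by rw [hl']; rfl)
      · exact Or.inl (List.mem_cons_of_mem _ hl')
    · rw [if_neg hs] at h
      cases ht : aFindReplace k v ls with
      | none => rw [ht] at h; cases h
      | some t =>
        rw [ht] at h
        cases Option.some.inj h
        rcases List.mem_cons.mp hl with hl' | hl'
        · exact Or.inl (by rw [hl']; exact List.mem_cons_self)
        · rcases ih t ht l hl' with h' | h'
          · exact Or.inl (List.mem_cons_of_mem _ h')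
          · exact Or.inr h'

lemma lookup_some_mem (s : String) (us : List (String × String)) (w : String)
    (h : us.lookup s = some w) : s ∈ us.map Prod.fst := by
  by_cases hm : s ∈ us.map Prod.fst
  · exact hm
  · rw [lookup_eq_none_of_not_mem s us hm] at h; cases h

lemma bPass_singleton_skip (us : List (String × String)) (a : String) (h : PySem.Set String)
    (hlk : ∀ s, lineKey a = some s → us.lookup s = none) :
    bPass us [a] h = ([a], h) := by
  rw [bPass_cons]
  cases hk : lineKey a with
  | none => rfl
  | some s => simp [hlk s hk, bPass]

lemma a_eq_b : ∀ (updates : List (String × String)) (lines : List String),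
    (updates.map Prod.fst).Nodup →
    (∀ p ∈ updates, '=' ∈ p.1.toList → ∀ l ∈ lines, ¬ PySem.Str.startswith l (p.1 ++ "=") = true) →
    (∀ p ∈ updates, ∀ q ∈ updates, p.1 ≠ q.1 → ('=' ∈ p.1.toList ∨ '=' ∈ q.1.toList) →
      ¬ PySem.Str.startswith (q.1 ++ "=\"" ++ q.2 ++ "\"") (p.1 ++ "=") = true ∧
      ¬ PySem.Str.startswith (q.1 ++ "=") (p.1 ++ "=") = true) →
    update_env_lines_py lines updates = update_env_lines_py_alt lines updates := by
  intro updates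
  induction updates with
  | nil =>
    intro lines _ _ _
    rw [alt_eq, bPass_nil_dict]
    rfl
  | cons kv us ih =>
    intro lines hnd hb hc
    obtain ⟨k, v⟩ := kv
    rw [List.map_cons] at hnd
    have hnd2 := List.nodup_cons.mp hnd
    have hknotin : k ∉ us.map Prod.fst := hnd2.1
    have hnd' : (us.map Prod.fst).Nodup := hnd2.2
    have hkne : ∀ p ∈ us, p.1 ≠ k := by
      intro p hp he
      exact hknotin (he ▸ List.mem_map_of_mem hp)
    have hc' : ∀ p ∈ us, ∀ q ∈ us, p.1 ≠ q.1 → ('=' ∈ p.1.toList ∨ '=' ∈ q.1.toList) →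
        ¬ PySem.Str.startswith (q.1 ++ "=\"" ++ q.2 ++ "\"") (p.1 ++ "=") = true ∧
        ¬ PySem.Str.startswith (q.1 ++ "=") (p.1 ++ "=") = true :=
      fun p hp q hq => hc p (List.mem_cons_of_mem _ hp) q (List.mem_cons_of_mem _ hq)
    -- the new line this update may write never matches an '='-containing key of us
    have hfmt_safe : ∀ p ∈ us, '=' ∈ p.1.toList →
        ¬ PySem.Str.startswith (fmt k v) (p.1 ++ "=") = true := by
      intro p hp hpe
      have := hc p (List.mem_cons_of_mem _ hp) (k, v) List.mem_cons_self (hkne p hp) (Or.inl hpe)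
      unfold fmt
      split
      · exact this.1
      · exact this.2
    have hstepA : update_env_lines_py lines ((k, v) :: us) =
        update_env_lines_py (match aFindReplace k v lines with
          | some ls' => ls'
          | none => if v ≠ "" then lines ++ [k ++ "=\"" ++ v ++ "\""] else lines) us := by
      simp [update_env_lines_py, List.foldl_cons]
    rw [hstepA]
    by_cases hkeq : '=' ∈ k.toList
    · -- inert '='-containing key: matches nothing in A, parses to no key in B
      have hnone : aFindReplace k v lines = none :=
        aFind_none k v lines (hb (k, v) List.mem_cons_self hkeq)
      rw [hnone]
      simp only []
      have hirr := bPass_irrelevant k v us hkeq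
      have hknotmem : k ∉ (bPass us lines PySem.Set.empty).2 := by
        intro hm
        rcases bPass_handled us lines PySem.Set.empty k hm with h' | h'
        · exact List.not_mem_nil h'
        · exact h' hkeq
      by_cases hv : v ≠ ""
      · rw [if_pos hv]
        have hb'' : ∀ p ∈ us, '=' ∈ p.1.toList →
            ∀ l ∈ lines ++ [k ++ "=\"" ++ v ++ "\""], ¬ PySem.Str.startswith l (p.1 ++ "=") = true := by
          intro p hp hpe l hl
          rcases List.mem_append.mp hl with hl' | hl'
          · exact hb p (List.mem_cons_of_mem _ hp) hpe l hl'
          · have hl'' : l = fmt k v := by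
              rcases List.mem_singleton.mp hl' with rfl
              simp [fmt, hv]
            rw [hl'']
            exact hfmt_safe p hp hpe
        rw [ih _ hnd' hb'' hc', alt_eq, alt_eq, bPass_append, hirr]
        have happ : bPass us [k ++ "=\"" ++ v ++ "\""] (bPass us lines PySem.Set.empty).2 =
            ([k ++ "=\"" ++ v ++ "\""], (bPass us lines PySem.Set.empty).2) := by
          apply bPass_singleton_skip
          intro s hs
          cases hlu : us.lookup s with
          | none => rfl
          | some w =>
            exfalso
            obtain ⟨q0, hq0, hq0s⟩ := List.mem_map.mp (lookup_some_mem s us w hlu)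
            have hsfree : '=' ∉ s.toList := lineKey_no_eq _ _ hs
            have hq0ne : q0.1 ≠ k := fun he => hsfree (hq0s ▸ he ▸ hkeq)
            have hcq := hc q0 (List.mem_cons_of_mem _ hq0) (k, v) List.mem_cons_self hq0ne
              (Or.inr hkeq)
            have hsw : PySem.Str.startswith (k ++ "=\"" ++ v ++ "\"") (s ++ "=") = true :=
              (A_match _ s hsfree).mpr hs
            rw [hq0s] at hcq
            exact hcq.1 hsw
        rw [happ]
        conv_rhs => rw [appPhase_cons]
        rw [if_pos ⟨fun hcont => hknotmem ((PySem.Set.contains_iff _ _).mp hcont), hv⟩]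
      · rw [if_neg hv]
        have hb'' : ∀ p ∈ us, '=' ∈ p.1.toList →
            ∀ l ∈ lines, ¬ PySem.Str.startswith l (p.1 ++ "=") = true :=
          fun p hp => hb p (List.mem_cons_of_mem _ hp)
        rw [ih _ hnd' hb'' hc', alt_eq, alt_eq, hirr]
        conv_rhs => rw [appPhase_cons]
        rw [if_neg (fun hcont => hv hcont.2)]
    · -- ordinary '='-free key: A's scan commutes with B's single pass
      have hk : '=' ∉ k.toList := hkeq
      have hcm := bPass_commute k v us hk hknotin lines PySem.Set.empty
        (by simp [PySem.Set.empty])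
      cases haf : aFindReplace k v lines with
      | some ls' =>
        rw [haf] at hcm
        obtain ⟨e1, e2⟩ := hcm
        simp only []
        have hb'' : ∀ p ∈ us, '=' ∈ p.1.toList →
            ∀ l ∈ ls', ¬ PySem.Str.startswith l (p.1 ++ "=") = true := by
          intro p hp hpe l hl
          rcases mem_aFind k v lines ls' haf l hl with hl' | hl'
          · exact hb p (List.mem_cons_of_mem _ hp) hpe l hl'
          · rw [hl']; exact hfmt_safe p hp hpe
        rw [ih ls' hnd' hb'' hc', alt_eq, alt_eq]
        have hkmem : k ∈ (bPass ((k, v) :: us) lines PySem.Set.empty).2 := (e2 k).mpr (Or.inl rfl)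
        conv_rhs => rw [appPhase_cons]
        rw [if_neg (by
          rintro ⟨hnc, -⟩
          exact hnc ((PySem.Set.contains_iff _ _).mpr hkmem))]
        rw [e1]
        exact (appPhase_congr us (bPass us ls' PySem.Set.empty).2
          (bPass ((k, v) :: us) lines PySem.Set.empty).2
          (fun p hp => by
            rw [e2 p.1]
            constructor
            · exact Or.inr
            · rintro (he | h')
              · exact absurd he (hkne p hp)
              · exact h') _)
      | none =>
        rw [haf] at hcm
        obtain ⟨e1, e2, e3⟩ := hcm
        simp only []
        by_cases hv : v ≠ ""
        · have hb'' : ∀ p ∈ us, '=' ∈ p.1.toList →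
              ∀ l ∈ lines ++ [k ++ "=\"" ++ v ++ "\""], ¬ PySem.Str.startswith l (p.1 ++ "=") = true := by
            intro p hp hpe l hl
            rcases List.mem_append.mp hl with hl' | hl'
            · exact hb p (List.mem_cons_of_mem _ hp) hpe l hl'
            · have hl'' : l = fmt k v := by
                rcases List.mem_singleton.mp hl' with rfl
                simp [fmt, hv]
              rw [hl'']
              exact hfmt_safe p hp hpe
          rw [if_pos hv, ih _ hnd' hb'' hc', alt_eq, alt_eq, bPass_append]
          have hlkapp : lineKey (k ++ "=\"" ++ v ++ "\"") = some k := by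
            have := lineKey_fmt k v hk
            rwa [fmt, if_pos hv] at this
          rw [bPass_cons, hlkapp]
          simp only []
          rw [lookup_eq_none_of_not_mem k us hknotin]
          simp only [bPass]
          conv_rhs => rw [appPhase_cons]
          rw [if_pos ⟨fun hcont => e3 ((PySem.Set.contains_iff _ _).mp hcont), hv⟩]
          rw [e1]
          exact (appPhase_congr us (bPass us lines PySem.Set.empty).2
            (bPass ((k, v) :: us) lines PySem.Set.empty).2
            (fun p hp => (e2 p.1).symm) _)
        · have hb'' : ∀ p ∈ us, '=' ∈ p.1.toList →
              ∀ l ∈ lines, ¬ PySem.Str.startswith l (p.1 ++ "=") = true :=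
            fun p hp => hb p (List.mem_cons_of_mem _ hp)
          rw [if_neg hv, ih _ hnd' hb'' hc', alt_eq, alt_eq]
          conv_rhs => rw [appPhase_cons]
          rw [if_neg (fun hcont => hv hcont.2)]
          rw [e1]
          exact (appPhase_congr us (bPass us lines PySem.Set.empty).2
            (bPass ((k, v) :: us) lines PySem.Set.empty).2
            (fun p hp => (e2 p.1).symm) _)

-- ===== VERDICT (by name: the statement is the Claim_ definition above) =====
theorem update_env_lines_py_spec : Claim_equal_update_env_lines_py := by
  intro lines updates _ hpre
  unfold Spec_update_env_lines_py
  exact a_eq_b updates lines hpre.1 hpre.2.1 hpre.2.2
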